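-- pv_equiv track=rewrite | github.com/lielserf/Search-in-Artificial-Intelligence---project | npuzzle/search.py | g_h
-- ===== SOURCE A (Python) =====
-- def g_h(queue, num_sec_tie):
--     best_g = min(queue, key=lambda tup: tup[3])[3]
--     nodes_with_best_g = [val for val in queue if val[3] == best_g]
--     if len(nodes_with_best_g) > 1:
--         num_sec_tie += 1
--         best_h = min([val[7] for val in nodes_with_best_g])
--         nodes_with_best_h = [val for val in nodes_with_best_g if val[7] == best_h]
--         node = nodes_with_best_h[0]
--     else:
--         node = nodes_with_best_g[0]
--     return node, num_sec_tie
-- ===== SOURCE B (Python) =====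
-- def g_h(queue, num_sec_tie):
--     by_g = sorted(queue, key=lambda t: t[3])
--     best_g = by_g[0][3]
--     if len(by_g) > 1 and by_g[1][3] == best_g:
--         tied = [t for t in by_g if t[3] == best_g]
--         return sorted(tied, key=lambda t: t[7])[0], num_sec_tie + 1
--     return by_g[0], num_sec_tie
-- ===== Notes on version B (the rewrite author's own statement) =====
-- stated objective: alternative
-- what changed: Replaces A's min-with-key call plus three comprehensions and a second min by a sort-based selection: stable-sort the queue by g, detect a g-tie by checking whether the second sorted element shares the head's g, and on a tie stable-sort the tied block by h and take its head.
import Mathlib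
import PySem

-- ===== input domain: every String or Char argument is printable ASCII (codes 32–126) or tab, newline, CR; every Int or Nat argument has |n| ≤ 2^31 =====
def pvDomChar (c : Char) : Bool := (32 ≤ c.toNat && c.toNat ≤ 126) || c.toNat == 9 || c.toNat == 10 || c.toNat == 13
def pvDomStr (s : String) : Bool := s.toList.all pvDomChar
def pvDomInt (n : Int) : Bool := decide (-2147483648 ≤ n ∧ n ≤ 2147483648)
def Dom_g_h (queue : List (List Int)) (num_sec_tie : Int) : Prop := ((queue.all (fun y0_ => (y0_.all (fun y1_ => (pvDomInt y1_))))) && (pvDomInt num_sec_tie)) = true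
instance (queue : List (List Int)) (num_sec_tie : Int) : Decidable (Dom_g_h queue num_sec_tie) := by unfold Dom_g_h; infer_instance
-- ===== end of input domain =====

-- B replaces A's min-with-key plus repeated comprehensions by a sort-based selection: stable-sort
-- the queue by g, detect a tie by peeking at the second sorted element, and on a tie stable-sort
-- the tied block by h and take its head; objective: alternative.


-- ===== PORT A =====
-- shared field accessors: tup[3] (the g-value) and tup[7] (the h-value)
def pvG (r : List Int) : Int := PySem.List.pyGetD r 3 0
def pvH (r : List Int) : Int := PySem.List.pyGetD r 7 0

def g_h (queue : List (List Int)) (num_sec_tie : Int) : List Int × Int :=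
  let best_g := pvG ((PySem.List.min? queue (fun tup => pvG tup)).getD [])
  let nodes_with_best_g := queue.filter (fun val => decide (pvG val = best_g))
  if nodes_with_best_g.length > 1 then
    let best_h := (PySem.List.min? (nodes_with_best_g.map (fun val => pvH val)) (fun y => y)).getD 0
    let nodes_with_best_h := nodes_with_best_g.filter (fun val => decide (pvH val = best_h))
    (nodes_with_best_h.headD [], num_sec_tie + 1)
  else
    (nodes_with_best_g.headD [], num_sec_tie)

-- ===== PORT B =====
-- Source B: stable sort by g; a tie on the minimal g shows up as by_g[1] sharing by_g[0]'s g;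
-- on a tie, stable-sort the tied block by h and take the head.
def g_h_alt (queue : List (List Int)) (num_sec_tie : Int) : List Int × Int :=
  let by_g := PySem.List.sorted queue (fun t => pvG t) false
  let best_g := pvG (by_g.headD [])   -- Source B raises IndexError on the empty queue (outside Pre_)
  if by_g.length > 1 ∧ pvG (PySem.List.pyGetD by_g 1 []) = best_g then
    let tied := by_g.filter (fun t => decide (pvG t = best_g))
    ((PySem.List.sorted tied (fun t => pvH t) false).headD [], num_sec_tie + 1)
  else
    (by_g.headD [], num_sec_tie)

-- ===== PRECONDITION & SPEC =====
-- Pre_ excludes exactly the inputs where Python A raises: the empty queue (ValueError from min),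
-- a row shorter than 4 (IndexError at tup[3]), and a tie on the minimal g one of whose tied rows
-- is shorter than 8 (IndexError at val[7]).
def Pre_g_h (queue : List (List Int)) (num_sec_tie : Int) : Prop :=
  queue ≠ [] ∧ (∀ r ∈ queue, 4 ≤ r.length) ∧
  ∀ r ∈ queue, (∀ s ∈ queue, r.getD 3 0 ≤ s.getD 3 0) →
    1 < (queue.filter (fun s => decide (s.getD 3 0 = r.getD 3 0))).length →
    ∀ s ∈ queue, s.getD 3 0 = r.getD 3 0 → 8 ≤ s.length
instance (queue : List (List Int)) (num_sec_tie : Int) : Decidable (Pre_g_h queue num_sec_tie) := by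
  unfold Pre_g_h; infer_instance
def pvWitness_g_h : List (List Int) × Int := ([[0, 0, 0, 1, 0, 0, 0, 2]], 0)

def Spec_g_h (queue : List (List Int)) (num_sec_tie : Int) (out : List Int × Int) : Prop := out = g_h_alt queue num_sec_tie
instance (queue : List (List Int)) (num_sec_tie : Int) (out : List Int × Int) : Decidable (Spec_g_h queue num_sec_tie out) := by unfold Spec_g_h; infer_instance

-- ===== CLAIM (what is proved, stated in full; the proofs are below) =====
def Claim_equal_g_h : Prop := ∀ (queue : List (List Int)) (num_sec_tie : Int), Dom_g_h queue num_sec_tie → Pre_g_h queue num_sec_tie → Spec_g_h queue num_sec_tie (g_h queue num_sec_tie)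

-- ===== LEMMAS AND PROOFS =====

-- inserting x into a key-nondecreasing list puts it after every element of the same key class,
-- so the filter by one key value gains x at the END (or not at all)
theorem insertBy_filter (k : List Int → Int) (c : Int) (x : List Int) :
    ∀ ys : List (List Int), ys.Pairwise (fun a b => k a ≤ k b) →
      (PySem.List.insertBy (fun a b => decide (k a < k b)) x ys).filter (fun y => decide (k y = c)) =
        ys.filter (fun y => decide (k y = c)) ++ (if k x = c then [x] else []) := by
  intro ys
  induction ys with
  | nil => intro _; by_cases h : k x = c <;> simp [PySem.List.insertBy, List.filter, h]
  | cons y t ih =>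
    intro hp
    rw [List.pairwise_cons] at hp
    obtain ⟨hy, hpt⟩ := hp
    by_cases hlt : k x < k y
    · simp only [PySem.List.insertBy, hlt, decide_true, if_true]
      by_cases hx : k x = c
      · have hyc : ¬ (k y = c) := by omega
        have hnt : t.filter (fun y => decide (k y = c)) = [] := by
          rw [List.filter_eq_nil_iff]
          intro z hz
          have := hy z hz
          simp; omega
        simp [List.filter, hx, hyc, hnt]
      · by_cases hyc : k y = c <;> simp [List.filter, hx, hyc]
    · simp only [PySem.List.insertBy, hlt, decide_false]
      by_cases hyc : k y = c
      · simp [List.filter, hyc, ih hpt]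
      · simp [List.filter, hyc, ih hpt]

-- STABILITY of PySem's sort: filtering a stable sort by one key value gives the original filter
theorem filter_sorted (k : List Int → Int) (c : Int) :
    ∀ xs : List (List Int),
      (PySem.List.sorted xs (fun y => k y) false).filter (fun y => decide (k y = c)) =
        xs.filter (fun y => decide (k y = c)) := by
  intro xs
  induction xs using List.reverseRecOn with
  | nil => rw [PySem.List.sorted_eq_foldl_insertBy]; rfl
  | append_singleton xs x ih =>
    have hstep : PySem.List.sorted (xs ++ [x]) (fun y => k y) false =
        PySem.List.insertBy (fun a b => decide (k a < k b)) x (PySem.List.sorted xs (fun y => k y) false) := by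
      rw [PySem.List.sorted_eq_foldl_insertBy, PySem.List.sorted_eq_foldl_insertBy, List.foldl_append]
      rfl
    rw [hstep, insertBy_filter k c x _ (PySem.List.sorted_pairwise xs (fun y => k y)), ih,
      List.filter_append]
    by_cases hx : k x = c <;> simp [List.filter, hx]

-- the head of a stable sort is the FIRST element of the list attaining the minimal key,
-- i.e. the head of the filter by the minimal key value
theorem headD_filter_eq_head_sorted (k : List Int → Int) (xs : List (List Int))
    {t0 : List Int} {T' : List (List Int)}
    (hT : PySem.List.sorted xs (fun y => k y) false = t0 :: T') :
    (xs.filter (fun y => decide (k y = k t0))).headD [] = t0 := by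
  have h := filter_sorted k (k t0) xs
  rw [hT] at h
  simp only [List.filter, decide_true] at h
  rw [← h]
  rfl

theorem g_h_eq (queue : List (List Int)) (num_sec_tie : Int) :
    g_h queue num_sec_tie = g_h_alt queue num_sec_tie := by
  cases queue with
  | nil => rfl
  | cons q0 rest =>
    -- the sorted queue and its head
    obtain ⟨b0, S', hS0⟩ := List.exists_cons_of_ne_nil
      (fun h => (List.cons_ne_nil q0 rest) ((PySem.List.sorted_eq_nil_iff (q0 :: rest) (fun t => pvG t) false).mp h))
    have hb0mem : b0 ∈ q0 :: rest := by
      rw [← PySem.List.mem_sorted (key := fun t => pvG t) (rev := false), hS0]; exact List.mem_cons_self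
    have hb0min : ∀ y ∈ q0 :: rest, pvG b0 ≤ pvG y :=
      PySem.List.key_head_sorted_le (q0 :: rest) (fun t => pvG t) hS0
    -- A's best_g is the head key of the sorted queue
    cases hmin : PySem.List.min? (q0 :: rest) (fun tup => pvG tup) with
    | none => exact absurd ((PySem.List.min?_eq_none_iff _ _).mp hmin) (List.cons_ne_nil q0 rest)
    | some m =>
    have hgc : pvG m = pvG b0 :=
      le_antisymm (PySem.List.min?_isMin hmin b0 hb0mem) (hb0min m (PySem.List.min?_mem hmin))
    -- the filtered tied block is the same list on both sides (stability)
    have hfilt : (q0 :: rest).filter (fun val => decide (pvG val = pvG b0)) =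
        b0 :: S'.filter (fun val => decide (pvG val = pvG b0)) := by
      have h := filter_sorted pvG (pvG b0) (q0 :: rest)
      rw [hS0] at h
      simpa using h.symm
    have hpw : (b0 :: S').Pairwise (fun a b => pvG a ≤ pvG b) := by
      have := PySem.List.sorted_pairwise (q0 :: rest) (fun t => pvG t)
      rwa [hS0] at this
    simp only [g_h, g_h_alt, hmin, Option.getD_some, hgc, hS0, hfilt, List.headD_cons]
    have hfiltB : List.filter (fun val => decide (pvG val = pvG b0)) (b0 :: S') =
        b0 :: List.filter (fun val => decide (pvG val = pvG b0)) S' := by simp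
    rw [hfiltB]
    -- the B-side tie test (second sorted element shares the minimal g) is A's |tied block| > 1
    have hiff : ((b0 :: S').length > 1 ∧ pvG (PySem.List.pyGetD (b0 :: S') 1 []) = pvG b0) ↔
        (b0 :: List.filter (fun val => decide (pvG val = pvG b0)) S').length > 1 := by
      cases S' with
      | nil => simp
      | cons s1 S'' =>
        have h1 : PySem.List.pyGetD (b0 :: s1 :: S'') 1 ([] : List Int) = s1 := by
          simp [PySem.List.pyGetD]
        rw [h1, List.pairwise_cons] at *
        obtain ⟨hb, hpw'⟩ := hpw
        rw [List.pairwise_cons] at hpw'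
        obtain ⟨hs1, -⟩ := hpw'
        constructor
        · rintro ⟨-, h2⟩
          simp [List.filter, h2]
        · intro hlen
          refine ⟨by simp, ?_⟩
          by_cases hc : pvG s1 = pvG b0
          · exact hc
          · exfalso
            simp only [List.filter, hc, decide_false] at hlen
            cases hz : List.filter (fun val => decide (pvG val = pvG b0)) S'' with
            | nil => rw [hz] at hlen; simp at hlen
            | cons z Z =>
              have hzmem : z ∈ List.filter (fun val => decide (pvG val = pvG b0)) S'' := by
                rw [hz]; exact List.mem_cons_self
              rw [List.mem_filter] at hzmem
              have h3 := hs1 z hzmem.1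
              have h4 := hb s1 (List.mem_cons_self)
              have h5 : pvG z = pvG b0 := by simpa using hzmem.2
              omega
    by_cases htie : (b0 :: List.filter (fun val => decide (pvG val = pvG b0)) S').length > 1
    · rw [if_pos htie, if_pos (hiff.mpr htie)]
      -- tie branch: the head of the stable sort by h is A's first node with the minimal h
      obtain ⟨t0, T', hT⟩ := List.exists_cons_of_ne_nil
        (fun h => (List.cons_ne_nil b0 _)
          ((PySem.List.sorted_eq_nil_iff (b0 :: List.filter (fun val => decide (pvG val = pvG b0)) S')
            (fun val => pvH val) false).mp h))
      have ht0mem : t0 ∈ b0 :: List.filter (fun val => decide (pvG val = pvG b0)) S' := by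
        rw [← PySem.List.mem_sorted (key := fun val => pvH val) (rev := false), hT]
        exact List.mem_cons_self
      have ht0min := PySem.List.key_head_sorted_le
        (b0 :: List.filter (fun val => decide (pvG val = pvG b0)) S') (fun val => pvH val) hT
      cases hmh : PySem.List.min?
          ((b0 :: List.filter (fun val => decide (pvG val = pvG b0)) S').map (fun val => pvH val))
          (fun y => y) with
      | none =>
        have := (PySem.List.min?_eq_none_iff _ _).mp hmh
        simp at this
      | some v =>
      have hv : v = pvH t0 := by
        refine le_antisymm (PySem.List.min?_isMin hmh (pvH t0) (List.mem_map_of_mem ht0mem)) ?_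
        obtain ⟨y, hy, hyv⟩ := List.mem_map.mp (PySem.List.min?_mem hmh)
        rw [← hyv]
        exact ht0min y hy
      rw [Option.getD_some, hv,
        headD_filter_eq_head_sorted pvH _ hT, hT, List.headD_cons]
    · rw [if_neg htie, if_neg (fun h => htie (hiff.mp h))]

-- ===== VERDICT (by name: the statement is the Claim_ definition above) =====
theorem g_h_spec : Claim_equal_g_h := by
  intro queue num _ _
  unfold Spec_g_h
  exact g_h_eq queue num
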